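-- pv_equiv track=rewrite | github.com/hemantsinha01/PDF2EXCEL | try/column.py | find_empty_columns_in_section
-- ===== SOURCE A (Python) =====
-- from typing import List, Tuple, Set
--
-- def find_empty_columns_in_section(data: List[List[str]], start_row: int, end_row: int, expected_positions: List[int]) -> Set[int]:
--     """Find empty columns in a specific section"""
--     empty_columns = set()
--
--     if not data or start_row >= len(data):
--         return empty_columns
--
--     # Get the actual column count in this section
--     max_cols = 0
--     for i in range(start_row, min(end_row, len(data))):
--         if data[i]:
--             max_cols = max(max_cols, len(data[i]))
--
--     # Check if there are extra columns compared to expected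
--     if max_cols > len(expected_positions):
--         # Check each column to see if it's empty
--         for col_idx in range(max_cols):
--             if col_idx not in expected_positions:
--                 # Check if this column is empty throughout the section
--                 is_empty = True
--                 for row_idx in range(start_row, min(end_row, len(data))):
--                     if row_idx < len(data) and col_idx < len(data[row_idx]):
--                         cell_value = str(data[row_idx][col_idx]).strip()
--                         if cell_value and cell_value != '0' and cell_value.lower() not in ['null', '']:
--                             is_empty = False
--                             break
--
--                 if is_empty:
--                     empty_columns.add(col_idx)
--
--     return empty_columns
-- ===== SOURCE B (Python) =====
-- def find_empty_columns_in_section(data, start_row, end_row, expected_positions):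
--     """Single row-major pass: collect columns that have content, then complement."""
--     if not data or start_row >= len(data):
--         return set()
--     stop = min(end_row, len(data))
--     max_cols = 0
--     has_content = set()
--     for i in range(start_row, stop):
--         row = data[i]
--         max_cols = max(max_cols, len(row))
--         for c, cell in enumerate(row):
--             v = str(cell).strip()
--             if v and v != '0' and v.lower() not in ['null', '']:
--                 has_content.add(c)
--     if max_cols > len(expected_positions):
--         return {c for c in range(max_cols)
--                 if c not in expected_positions and c not in has_content}
--     return set()
-- ===== Notes on version B (the rewrite author's own statement) =====
-- stated objective: alternative
-- what changed: A re-scans the section once per candidate column (per-column loop with early break); B makes a single row-major pass that records every content-bearing column index in a set and then returns the complement of expected and content-bearing columns.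
import Mathlib
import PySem

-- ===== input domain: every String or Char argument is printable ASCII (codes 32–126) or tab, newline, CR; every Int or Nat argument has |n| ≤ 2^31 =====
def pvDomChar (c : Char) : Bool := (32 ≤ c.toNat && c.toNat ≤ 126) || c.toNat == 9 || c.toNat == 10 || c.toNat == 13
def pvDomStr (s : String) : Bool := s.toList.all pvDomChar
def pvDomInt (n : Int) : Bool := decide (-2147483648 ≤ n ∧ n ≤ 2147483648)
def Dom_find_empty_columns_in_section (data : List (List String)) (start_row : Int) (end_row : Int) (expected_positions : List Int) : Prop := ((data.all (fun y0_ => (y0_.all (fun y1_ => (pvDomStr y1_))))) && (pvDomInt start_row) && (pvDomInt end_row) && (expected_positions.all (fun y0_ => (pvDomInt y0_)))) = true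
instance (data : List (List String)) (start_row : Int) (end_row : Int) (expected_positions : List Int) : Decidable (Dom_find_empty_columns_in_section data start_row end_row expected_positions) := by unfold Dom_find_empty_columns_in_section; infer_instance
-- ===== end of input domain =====

-- B replaces A's per-column rescans of the section by one row-major pass collecting
-- the content-bearing column indices, then takes the complement (objective: alternative).

-- the shared cell predicate: str(cell).strip() is truthy, != '0', and lower() not in ['null','']
def pvContent (cell : String) : Bool :=
  let v := PySem.Str.strip cell
  v != "" && v != "0" && !(["null", ""].contains (PySem.Str.lower v))

-- ===== PORT A =====
def find_empty_columns_in_section (data : List (List String)) (start_row : Int) (end_row : Int) (expected_positions : List Int) : List Int :=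
  if data = [] ∨ (data.length : Int) ≤ start_row then []
  else
    let stop := min end_row (data.length : Int)
    let max_cols := (PySem.List.pyRange start_row stop 1).foldl
      (fun m i =>
        let row := PySem.List.pyGetD data i []
        if row ≠ [] then max m (PySem.List.len row) else m) 0
    if (expected_positions.length : Int) < max_cols then
      (PySem.List.pyRange 0 max_cols 1).foldl
        (fun acc col =>
          if col ∉ expected_positions then
            let is_empty := (PySem.List.pyRange start_row stop 1).foldl
              (fun b i =>
                if i < (data.length : Int) ∧ col < PySem.List.len (PySem.List.pyGetD data i []) then
                  if pvContent (PySem.List.pyGetD (PySem.List.pyGetD data i []) col "") then false else b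
                else b) true
            if is_empty then PySem.Set.add acc col else acc
          else acc) PySem.Set.empty
    else []

-- ===== PORT B =====
def find_empty_columns_in_section_alt (data : List (List String)) (start_row : Int) (end_row : Int) (expected_positions : List Int) : List Int :=
  if data = [] ∨ (data.length : Int) ≤ start_row then []
  else
    let stop := min end_row (data.length : Int)
    let st := (PySem.List.pyRange start_row stop 1).foldl
      (fun (p : Int × PySem.Set Int) i =>
        let row := PySem.List.pyGetD data i []
        (max p.1 (PySem.List.len row),
         (PySem.List.enumerate row).foldl
           (fun s q => if pvContent q.2 then PySem.Set.add s q.1 else s) p.2))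
      (0, PySem.Set.empty)
    if (expected_positions.length : Int) < st.1 then
      (PySem.List.pyRange 0 st.1 1).foldl
        (fun acc c =>
          if c ∉ expected_positions ∧ c ∉ st.2 then PySem.Set.add acc c else acc)
        PySem.Set.empty
    else []

-- ===== PRECONDITION & SPEC =====
-- Pre_ excludes exactly the inputs on which A raises IndexError: a nonempty data with
-- start_row below -len(data) and a nonempty row range (there data[i] raises in A's first loop).
def Pre_find_empty_columns_in_section (data : List (List String)) (start_row : Int) (end_row : Int) (expected_positions : List Int) : Prop :=
  data = [] ∨ -(data.length : Int) ≤ start_row ∨ min end_row (data.length : Int) ≤ start_row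
instance (data : List (List String)) (start_row : Int) (end_row : Int) (expected_positions : List Int) : Decidable (Pre_find_empty_columns_in_section data start_row end_row expected_positions) := by unfold Pre_find_empty_columns_in_section; infer_instance

def pvWitness_find_empty_columns_in_section : List (List String) × Int × Int × List Int :=
  ([["x", ""], ["", "0"], ["null", "", "y"]], 0, 3, [0, 2])

def Spec_find_empty_columns_in_section (data : List (List String)) (start_row : Int) (end_row : Int) (expected_positions : List Int) (out : List Int) : Prop := out = find_empty_columns_in_section_alt data start_row end_row expected_positions
instance (data : List (List String)) (start_row : Int) (end_row : Int) (expected_positions : List Int) (out : List Int) : Decidable (Spec_find_empty_columns_in_section data start_row end_row expected_positions out) := by unfold Spec_find_empty_columns_in_section; infer_instance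

-- ===== CLAIM (what is proved, stated in full; the proofs are below) =====
def Claim_equal_find_empty_columns_in_section : Prop := ∀ (data : List (List String)) (start_row : Int) (end_row : Int) (expected_positions : List Int), Dom_find_empty_columns_in_section data start_row end_row expected_positions → Pre_find_empty_columns_in_section data start_row end_row expected_positions → Spec_find_empty_columns_in_section data start_row end_row expected_positions (find_empty_columns_in_section data start_row end_row expected_positions)

-- ===== LEMMAS AND PROOFS =====

-- B's pair-fold splits into its two component folds
lemma pair_fold_split (data : List (List String)) (L : List Int) (m : Int) (s : PySem.Set Int) :
    L.foldl
      (fun (p : Int × PySem.Set Int) i =>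
        let row := PySem.List.pyGetD data i []
        (max p.1 (PySem.List.len row),
         (PySem.List.enumerate row).foldl
           (fun s q => if pvContent q.2 then PySem.Set.add s q.1 else s) p.2)) (m, s)
    = (L.foldl (fun m i => max m (PySem.List.len (PySem.List.pyGetD data i []))) m,
       L.foldl (fun s i => (PySem.List.enumerate (PySem.List.pyGetD data i [])).foldl
           (fun s q => if pvContent q.2 then PySem.Set.add s q.1 else s) s) s) := by
  induction L generalizing m s with
  | nil => rfl
  | cons i L ih =>
      simp only [List.foldl_cons]
      exact ih _ _

-- A's guarded max-fold equals B's unguarded one (an empty row contributes len 0)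
lemma max_fold_eq (data : List (List String)) (L : List Int) (m : Int) (hm : 0 ≤ m) :
    L.foldl (fun m i =>
        let row := PySem.List.pyGetD data i []
        if row ≠ [] then max m (PySem.List.len row) else m) m
    = L.foldl (fun m i => max m (PySem.List.len (PySem.List.pyGetD data i []))) m := by
  induction L generalizing m with
  | nil => rfl
  | cons i L ih =>
      simp only [List.foldl_cons]
      by_cases h : PySem.List.pyGetD data i [] = []
      · have e1 : (let row := PySem.List.pyGetD data i []
            if row ≠ [] then max m (PySem.List.len row) else m) = m := by simp [h]
        have e2 : max m (PySem.List.len (PySem.List.pyGetD data i [])) = m := by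
          simp [h, PySem.List.len_eq]; omega
        rw [e1, e2, ih m hm]
      · have e1 : (let row := PySem.List.pyGetD data i []
            if row ≠ [] then max m (PySem.List.len row) else m)
            = max m (PySem.List.len (PySem.List.pyGetD data i [])) := by simp [h]
        rw [e1]
        exact ih _ (le_max_of_le_left hm)

-- membership in a guarded fold of Set.add
lemma mem_foldl_add_if {α β : Type} [BEq β] [LawfulBEq β] (l : List α) (p : α → Bool) (f : α → β)
    (s : PySem.Set β) (y : β) :
    y ∈ l.foldl (fun s q => if p q then PySem.Set.add s (f q) else s) s ↔
      y ∈ s ∨ ∃ q ∈ l, p q ∧ y = f q := by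
  induction l generalizing s with
  | nil => simp
  | cons a l ih =>
      simp only [List.foldl_cons, ih]
      by_cases h : p a <;> simp [h, PySem.Set.mem_add] <;> tauto

-- membership in B's has_content accumulator
lemma mem_hc (data : List (List String)) (L : List Int) (s : PySem.Set Int) (c : Int) :
    c ∈ L.foldl (fun s i => (PySem.List.enumerate (PySem.List.pyGetD data i [])).foldl
           (fun s q => if pvContent q.2 then PySem.Set.add s q.1 else s) s) s
    ↔ c ∈ s ∨ ∃ i ∈ L, ∃ q ∈ PySem.List.enumerate (PySem.List.pyGetD data i []) 0,
        pvContent q.2 ∧ c = q.1 := by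
  induction L generalizing s with
  | nil => simp
  | cons i L ih =>
      simp only [List.foldl_cons, ih,
        mem_foldl_add_if (PySem.List.enumerate (PySem.List.pyGetD data i []) 0)
          (fun q => pvContent q.2) (fun q => q.1) s c]
      constructor
      · rintro (⟨h | ⟨q, hq, hp, he⟩⟩ | ⟨j, hj, hq⟩)
        · exact Or.inl h
        · exact Or.inr ⟨i, List.mem_cons_self, q, hq, hp, he⟩
        · exact Or.inr ⟨j, List.mem_cons_of_mem _ hj, hq⟩
      · rintro (h | ⟨j, hj, hq⟩)
        · exact Or.inl (Or.inl h)
        · rcases List.mem_cons.mp hj with rfl | hj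
          · obtain ⟨q, hq, hp, he⟩ := hq
            exact Or.inl (Or.inr ⟨q, hq, hp, he⟩)
          · exact Or.inr ⟨j, hj, hq⟩

-- A's is_empty fold computes "no row hits column c"
lemma is_empty_fold (data : List (List String)) (L : List Int) (c : Int) (b : Bool) :
    L.foldl
      (fun b i =>
        if i < (data.length : Int) ∧ c < PySem.List.len (PySem.List.pyGetD data i []) then
          if pvContent (PySem.List.pyGetD (PySem.List.pyGetD data i []) c "") then false else b
        else b) b
    = (b && !(L.any (fun i =>
        if i < (data.length : Int) ∧ c < PySem.List.len (PySem.List.pyGetD data i []) then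
          pvContent (PySem.List.pyGetD (PySem.List.pyGetD data i []) c "")
        else false))) := by
  induction L generalizing b with
  | nil => simp
  | cons i L ih =>
      simp only [List.foldl_cons, List.any_cons]
      by_cases h : i < (data.length : Int) ∧ c < PySem.List.len (PySem.List.pyGetD data i [])
      · rw [if_pos h, if_pos h]
        by_cases hp : pvContent (PySem.List.pyGetD (PySem.List.pyGetD data i []) c "") = true
        · rw [if_pos hp, ih, hp]
          cases b <;> simp
        · rw [Bool.not_eq_true] at hp
          rw [if_neg (by simp [hp]), ih, hp]
          cases b <;> simp
      · rw [if_neg h, if_neg h, ih]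
        cases b <;> simp

-- a row "hits" column c iff some enumerate entry at index c has content (0 ≤ c)
lemma hit_iff_enumerate (row : List String) (c : Int) (hc : 0 ≤ c) :
    (c < PySem.List.len row ∧ pvContent (PySem.List.pyGetD row c "") = true) ↔
      ∃ q ∈ PySem.List.enumerate row 0, pvContent q.2 ∧ c = q.1 := by
  constructor
  · rintro ⟨hlt, hp⟩
    have hlt' : c.toNat < row.length := by simp [PySem.List.len_eq] at hlt; omega
    refine ⟨(c, row[c.toNat]), ?_, ?_, rfl⟩
    · rw [PySem.List.mem_enumerate_iff]
      exact ⟨c.toNat, hlt', by simp; omega⟩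
    · rwa [PySem.List.pyGetD_eq_getElem row "" hc (by simpa [PySem.List.len_eq] using hlt)] at hp
  · rintro ⟨q, hq, hp, rfl⟩
    rw [PySem.List.mem_enumerate_iff] at hq
    obtain ⟨k, hk, rfl⟩ := hq
    simp only [zero_add]
    constructor
    · simp [PySem.List.len_eq]; omega
    · rw [PySem.List.pyGetD_eq_getElem row "" (by positivity) (by simp; omega)]
      simpa using hp

-- ===== VERDICT (by name: the statement is the Claim_ definition above) =====
theorem find_empty_columns_in_section_spec : Claim_equal_find_empty_columns_in_section := by
  intro data start_row end_row expected_positions _ hpre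
  unfold Spec_find_empty_columns_in_section
  unfold find_empty_columns_in_section find_empty_columns_in_section_alt
  by_cases hg : data = [] ∨ (data.length : Int) ≤ start_row
  · simp [hg]
  · simp only [if_neg hg]
    have hne : data ≠ [] := fun h => hg (Or.inl h)
    have hsr : start_row < (data.length : Int) := lt_of_not_ge (fun h => hg (Or.inr h))
    set stop := min end_row (data.length : Int) with hstop
    set L := PySem.List.pyRange start_row stop 1 with hLdef
    -- every index the section visits is a valid Python index
    have hidx : ∀ i ∈ L, -(data.length : Int) ≤ i ∧ i < (data.length : Int) := by
      intro i hi
      rw [hLdef, PySem.List.mem_pyRange_one] at hi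
      have hpre' : -(data.length : Int) ≤ start_row := by
        rcases hpre with h | h | h
        · exact absurd h hne
        · exact h
        · exfalso; omega
      constructor
      · omega
      · have : i < stop := hi.2
        omega
    rw [pair_fold_split, ← max_fold_eq data L 0 le_rfl]
    set max_cols := L.foldl (fun m i =>
        let row := PySem.List.pyGetD data i []
        if row ≠ [] then max m (PySem.List.len row) else m) 0 with hmc
    by_cases hcmp : (expected_positions.length : Int) < max_cols
    · simp only [if_pos hcmp]
      apply PySem.List.foldl_congr_mem
      intro acc c hcL
      have hc0 : 0 ≤ c := by
        rw [PySem.List.mem_pyRange_one] at hcL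
        exact hcL.1
      by_cases hce : c ∈ expected_positions
      · simp [hce]
      · rw [if_pos hce]
        rw [is_empty_fold]
        set hc := L.foldl (fun s i => (PySem.List.enumerate (PySem.List.pyGetD data i [])).foldl
              (fun s q => if pvContent q.2 then PySem.Set.add s q.1 else s) s) PySem.Set.empty with hhc
        have hmem : (L.any (fun i =>
            if i < (data.length : Int) ∧ c < PySem.List.len (PySem.List.pyGetD data i []) then
              pvContent (PySem.List.pyGetD (PySem.List.pyGetD data i []) c "")
            else false)) = true ↔ c ∈ hc := by
          rw [hhc, mem_hc, List.any_eq_true]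
          simp only [PySem.Set.empty, List.not_mem_nil, false_or]
          constructor
          · rintro ⟨i, hi, hcond⟩
            by_cases h : i < (data.length : Int) ∧ c < PySem.List.len (PySem.List.pyGetD data i [])
            · rw [if_pos h] at hcond
              exact ⟨i, hi, (hit_iff_enumerate _ c hc0).mp ⟨h.2, hcond⟩⟩
            · rw [if_neg h] at hcond; exact absurd hcond (by simp)
          · rintro ⟨i, hi, hq⟩
            obtain ⟨hlt, hp⟩ := (hit_iff_enumerate (PySem.List.pyGetD data i []) c hc0).mpr hq
            exact ⟨i, hi, by rw [if_pos ⟨(hidx i hi).2, hlt⟩]; exact hp⟩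
        by_cases hhit : c ∈ hc
        · have hany := hmem.mpr hhit
          rw [hany, if_neg (by decide), if_neg (fun hcon => hcon.2 hhit)]
        · have hany : (L.any (fun i =>
              if i < (data.length : Int) ∧ c < PySem.List.len (PySem.List.pyGetD data i []) then
                pvContent (PySem.List.pyGetD (PySem.List.pyGetD data i []) c "")
              else false)) = false := by
            rw [Bool.eq_false_iff]; intro h; exact hhit (hmem.mp h)
          rw [hany, if_pos (by decide), if_pos ⟨hce, hhit⟩]
    · simp [if_neg hcmp]
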